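-- pv_equiv track=rewrite | github.com/pypi-data/pypi-mirror-275 | packages/number2text/number2text-0.0.1.tar.gz/number2text-0.0.1/number2text/lang/ug.py | convert
-- ===== SOURCE A (Python) =====
-- _ones= ["", "bir", "ikki", "üç", "tört", "bäş", "alte", "yette", "sekkiz", "toqquz"]
--
-- _teens = ["on", "on bir", "on ikki", "on üç", "on tört", "on bäş", "on alte", "on yette", "on sekkiz", "on toqquz"]
--
-- _tens = ["", "", "yigirme", "otuz", "qirq", "ällik", "atmish", "yätmish", "säksän", "toqsan"]
--
-- _hundreds = ["", "bir yüz", "ikki yüz", "üç yüz", "tört yüz", "bäş yüz", "alte yüz", "yette yüz", "sekkiz yüz", "toqquz yüz"]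
--
-- _scales = [
--     ("", "", ""),
--     ("ming", "ming", "ming"),
--     ("million", "million", "million"),
--     ("milliard", "milliard", "milliard"),
--     ("trillion", "trillion", "trillion"),
--     ("kvadrillion", "kvadrillion", "kvadrillion"),
--     ("kvintilion", "kvintilion", "kvintilion"),
--     ("sekstilion", "sekstilion", "sekstilion"),
--     ("septilion", "septilion", "septilion"),
--     ("oktilion", "oktilion", "oktilion"),
--     ("nonilion", "nonilion", "nonilion"),
--     ("detsillion", "detsillion", "detsillion"),
-- ]
--
-- def convert_less_than_thousand(number):
--     if number < 10:
--         return _ones[number]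
--     elif number < 20:
--         return _teens[number - 10]
--     elif number < 100:
--         tens, ones = divmod(number, 10)
--         if ones == 0:
--             return _tens[tens]
--         else:
--             return _tens[tens] + " " + _ones[ones]
--     else:
--         hundreds, less_than_hundred = divmod(number, 100)
--         if less_than_hundred == 0:
--             return _hundreds[hundreds]
--         else:
--             return _hundreds[hundreds] + " " + convert_less_than_thousand(less_than_hundred)
--
-- def get_scale(number, scale_index):
--     if scale_index == 0:
--         return ""
--     elif number == 1:
--         return _scales[scale_index][0]
--     else:
--         return _scales[scale_index][1]
--
-- def convert(number):
--     if number == 0: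
--         return "nol"
--
--     if number < 0:
--         return "minus " + convert(-number)
--
--     parts = []
--     scale_index = 0
--     while number > 0:
--         if number % 1000 != 0:
--             part = convert_less_than_thousand(number % 1000)
--             scale = get_scale(number % 1000, scale_index)
--             if scale:
--                 part += " " + scale
--             parts.append(part)
--         number //= 1000
--         scale_index += 1
--
--     return " ".join(reversed(parts))
-- ===== SOURCE B (Python) =====
-- _ones = ["", "bir", "ikki", "üç", "tört", "bäş", "alte", "yette", "sekkiz", "toqquz"]
--
-- _teens = ["on", "on bir", "on ikki", "on üç", "on tört", "on bäş", "on alte", "on yette", "on sekkiz", "on toqquz"]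
--
-- _tens = ["", "", "yigirme", "otuz", "qirq", "ällik", "atmish", "yätmish", "säksän", "toqsan"]
--
-- _hundreds = ["", "bir yüz", "ikki yüz", "üç yüz", "tört yüz", "bäş yüz", "alte yüz", "yette yüz", "sekkiz yüz", "toqquz yüz"]
--
-- _scales = [
--     ("", "", ""),
--     ("ming", "ming", "ming"),
--     ("million", "million", "million"),
--     ("milliard", "milliard", "milliard"),
--     ("trillion", "trillion", "trillion"),
--     ("kvadrillion", "kvadrillion", "kvadrillion"),
--     ("kvintilion", "kvintilion", "kvintilion"),
--     ("sekstilion", "sekstilion", "sekstilion"),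
--     ("septilion", "septilion", "septilion"),
--     ("oktilion", "oktilion", "oktilion"),
--     ("nonilion", "nonilion", "nonilion"),
--     ("detsillion", "detsillion", "detsillion"),
-- ]
--
-- def _group_words(g):
--     # words for a 3-digit group, composed from the digit tables and joined
--     h, r = divmod(g, 100)
--     t, o = divmod(r, 10)
--     if t == 1:
--         pieces = [_hundreds[h], _teens[o]]
--     else:
--         pieces = [_hundreds[h], _tens[t], _ones[o]]
--     return " ".join(p for p in pieces if p)
--
-- def convert(number):
--     if number == 0:
--         return "nol"
--     if number < 0:
--         return "minus " + convert(-number)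
--     groups = []
--     while number > 0:
--         groups.append(number % 1000)
--         number //= 1000
--     words = []
--     for i in range(len(groups) - 1, -1, -1):
--         g = groups[i]
--         if g:
--             w = _group_words(g)
--             if i > 0:
--                 w += " " + _scales[i][0 if g == 1 else 1]
--             words.append(w)
--     return " ".join(words)
-- ===== Notes on version B (the rewrite author's own statement) =====
-- stated objective: alternative
-- what changed: Replaces A's recursive convert_less_than_thousand and its while-loop that appends parts and joins the reversed list with a staged pipeline: collect the base-1000 groups into a list first, build each group's words by composing hundreds/tens-or-teens/ones table pieces and filtering out the empty ones, and scan the group list by descending index so no reversal is needed.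
import Mathlib
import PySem

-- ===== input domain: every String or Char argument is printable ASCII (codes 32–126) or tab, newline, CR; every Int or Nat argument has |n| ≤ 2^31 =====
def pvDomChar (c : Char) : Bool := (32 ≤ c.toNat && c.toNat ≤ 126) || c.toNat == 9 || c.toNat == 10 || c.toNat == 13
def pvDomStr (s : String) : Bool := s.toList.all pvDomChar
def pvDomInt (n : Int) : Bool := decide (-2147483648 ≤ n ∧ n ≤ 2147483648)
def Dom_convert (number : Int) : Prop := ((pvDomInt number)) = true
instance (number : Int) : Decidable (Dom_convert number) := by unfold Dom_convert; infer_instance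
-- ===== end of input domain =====

-- B (convert_alt) replaces A's recursive per-hundred decomposition and while-loop-with-reversed-join by
-- a staged pipeline: collect the base-1000 groups into a list, then build each group's words by composing
-- digit-table pieces and filtering out empty ones, scanning the group list by descending index. Same results.

-- ===== PORT A =====
-- termination facts for the ports (cited by name in decreasing_by)
theorem pvModLt100 (number : Int) (h : ¬ number < 100) :
    (PySem.Int.mod number 100).toNat < number.toNat := by
  have h1 : 0 ≤ PySem.Int.mod number 100 := PySem.Int.mod_nonneg number (by omega)
  have h2 : PySem.Int.mod number 100 < 100 := PySem.Int.mod_lt number (by omega)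
  omega

theorem pvDivLt (n : Int) (h : 0 < n) :
    (PySem.Int.floordiv n 1000).toNat < n.toNat := by
  have h1 : 0 ≤ PySem.Int.floordiv n 1000 := by
    rw [PySem.Int.floordiv_eq_ediv_of_pos (by omega)]
    exact Int.ediv_nonneg (by omega) (by omega)
  have h2 : PySem.Int.floordiv n 1000 < n :=
    (PySem.Int.floordiv_lt_iff_lt_mul (by omega)).mpr (lt_mul_of_one_lt_right h (by norm_num))
  omega

theorem pvNegLt (number : Int) (h : number < 0) :
    (if -number < 0 then (1:Nat) else 0) < (if number < 0 then 1 else 0) := by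
  rw [if_pos h, if_neg (by omega)]
  omega

-- module-level word tables of the Python file (shared constants)
def pvOnes : List String := ["", "bir", "ikki", "üç", "tört", "bäş", "alte", "yette", "sekkiz", "toqquz"]
def pvTeens : List String := ["on", "on bir", "on ikki", "on üç", "on tört", "on bäş", "on alte", "on yette", "on sekkiz", "on toqquz"]
def pvTens : List String := ["", "", "yigirme", "otuz", "qirq", "ällik", "atmish", "yätmish", "säksän", "toqsan"]
def pvHundreds : List String := ["", "bir yüz", "ikki yüz", "üç yüz", "tört yüz", "bäş yüz", "alte yüz", "yette yüz", "sekkiz yüz", "toqquz yüz"]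
def pvScales : List (String × String × String) :=
  [("", "", ""), ("ming", "ming", "ming"), ("million", "million", "million"),
   ("milliard", "milliard", "milliard"), ("trillion", "trillion", "trillion"),
   ("kvadrillion", "kvadrillion", "kvadrillion"), ("kvintilion", "kvintilion", "kvintilion"),
   ("sekstilion", "sekstilion", "sekstilion"), ("septilion", "septilion", "septilion"),
   ("oktilion", "oktilion", "oktilion"), ("nonilion", "nonilion", "nonilion"),
   ("detsillion", "detsillion", "detsillion")]

-- A's convert_less_than_thousand; list indexing is always in range on the reachable inputs,
-- so pyGetD with default "" is exact there
def convert_less_than_thousand (number : Int) : String :=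
  if number < 10 then PySem.List.pyGetD pvOnes number ""
  else if number < 20 then PySem.List.pyGetD pvTeens (number - 10) ""
  else if number < 100 then
    let tens := PySem.Int.floordiv number 10
    let ones := PySem.Int.mod number 10
    if ones = 0 then PySem.List.pyGetD pvTens tens ""
    else PySem.List.pyGetD pvTens tens "" ++ " " ++ PySem.List.pyGetD pvOnes ones ""
  else
    let hundreds := PySem.Int.floordiv number 100
    let less_than_hundred := PySem.Int.mod number 100
    if less_than_hundred = 0 then PySem.List.pyGetD pvHundreds hundreds ""
    else PySem.List.pyGetD pvHundreds hundreds "" ++ " " ++ convert_less_than_thousand less_than_hundred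
termination_by number.toNat
decreasing_by exact pvModLt100 number (by omega)

-- A's get_scale; index always in range on the domain, so pyGetD with a default triple is exact there
def get_scale (number : Int) (scale_index : Int) : String :=
  if scale_index = 0 then ""
  else if number = 1 then (PySem.List.pyGetD pvScales scale_index ("", "", "")).1
  else (PySem.List.pyGetD pvScales scale_index ("", "", "")).2.1

-- the while-loop of A: the list `parts` it builds, in append order
def convertParts (n : Int) (scale_index : Int) : List String :=
  if h : 0 < n then
    (if PySem.Int.mod n 1000 ≠ 0 then
       let part := convert_less_than_thousand (PySem.Int.mod n 1000)
       let scale := get_scale (PySem.Int.mod n 1000) scale_index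
       [if scale ≠ "" then part ++ " " ++ scale else part]
     else [])
      ++ convertParts (PySem.Int.floordiv n 1000) (scale_index + 1)
  else []
termination_by n.toNat
decreasing_by exact pvDivLt n (by omega)

def convert (number : Int) : String :=
  if number = 0 then "nol"
  else if h : number < 0 then "minus " ++ convert (-number)
  else PySem.Str.join " " (List.reverse (convertParts number 0))
termination_by (if number < 0 then 1 else 0 : Nat)
decreasing_by exact pvNegLt number h

-- ===== PORT B =====
-- _group_words of Source B: compose the group's words from digit-table pieces, drop empty pieces, join
def groupWords (g : Int) : String :=
  let h := PySem.Int.floordiv g 100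
  let r := PySem.Int.mod g 100
  let t := PySem.Int.floordiv r 10
  let o := PySem.Int.mod r 10
  let pieces :=
    if t = 1 then [PySem.List.pyGetD pvHundreds h "", PySem.List.pyGetD pvTeens o ""]
    else [PySem.List.pyGetD pvHundreds h "", PySem.List.pyGetD pvTens t "", PySem.List.pyGetD pvOnes o ""]
  PySem.Str.join " " (pieces.filter (fun p => p ≠ ""))

-- _scales[i][0 if g == 1 else 1] of Source B; i is always in range on the domain
def scaleWord (i : Nat) (g : Int) : String :=
  if g = 1 then (PySem.List.pyGetD pvScales (i : Int) ("", "", "")).1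
  else (PySem.List.pyGetD pvScales (i : Int) ("", "", "")).2.1

-- the first while-loop of Source B: the list `groups`, least-significant group first
def groupsOf (n : Int) : List Int :=
  if h : 0 < n then PySem.Int.mod n 1000 :: groupsOf (PySem.Int.floordiv n 1000) else []
termination_by n.toNat
decreasing_by exact pvDivLt n h

-- the for-loop of Source B over i = k-1, …, 0: the `words` list (groups[i] is in range, getD is exact)
def wordsDesc (groups : List Int) : Nat → List String
  | 0 => []
  | k + 1 =>
      let g := groups.getD k 0
      (if g ≠ 0 then
         [if 0 < k then groupWords g ++ " " ++ scaleWord k g else groupWords g]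
       else []) ++ wordsDesc groups k

def convert_alt (number : Int) : String :=
  if number = 0 then "nol"
  else if h : number < 0 then "minus " ++ convert_alt (-number)
  else
    let groups := groupsOf number
    PySem.Str.join " " (wordsDesc groups groups.length)
termination_by (if number < 0 then 1 else 0 : Nat)
decreasing_by exact pvNegLt number h

-- ===== PRECONDITION & SPEC =====
def Spec_convert (number : Int) (out : String) : Prop := out = convert_alt number
instance (number : Int) (out : String) : Decidable (Spec_convert number out) := by unfold Spec_convert; infer_instance

-- ===== CLAIM (what is proved, stated in full; the proofs are below) =====
def Claim_equal_convert : Prop := ∀ (number : Int), Dom_convert number → Spec_convert number (convert number)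

-- ===== LEMMAS AND PROOFS =====

lemma cat_ne_empty (a b : String) : a ++ " " ++ b ≠ "" := by
  intro h
  have := congrArg String.toList h
  simp [String.toList_append] at this

lemma join_nil : PySem.Str.join " " [] = "" := rfl

lemma join_singleton (p : String) : PySem.Str.join " " [p] = p := by
  simp [PySem.Str.join, PySem.Chars.join, List.intercalate, String.ofList_toList]

lemma join_cons (x : String) (L : List String) (h : L ≠ []) :
    PySem.Str.join " " (x :: L) = x ++ " " ++ PySem.Str.join " " L := by
  obtain ⟨y, ys, rfl⟩ := List.exists_cons_of_ne_nil h
  apply String.toList_inj.mp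
  simp only [PySem.Str.join, PySem.Chars.join, String.toList_ofList, String.toList_append,
    List.map_cons]
  simp [List.intercalate, List.intersperse]

lemma cltt_ne_empty (m : Int) (h1 : 0 < m) (h2 : m < 1000) :
    convert_less_than_thousand m ≠ "" := by
  rw [convert_less_than_thousand]
  by_cases hm10 : m < 10
  · rw [if_pos hm10]
    interval_cases m <;> decide
  · rw [if_neg hm10]
    by_cases hm20 : m < 20
    · rw [if_pos hm20]
      interval_cases m <;> decide
    · rw [if_neg hm20]
      by_cases hm100 : m < 100
      · rw [if_pos hm100]
        simp only
        by_cases ho : PySem.Int.mod m 10 = 0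
        · rw [if_pos ho]
          have ht1 : 2 ≤ PySem.Int.floordiv m 10 := by
            rw [PySem.Int.floordiv_eq_ediv_of_pos (by omega)]; omega
          have ht2 : PySem.Int.floordiv m 10 ≤ 9 := by
            rw [PySem.Int.floordiv_eq_ediv_of_pos (by omega)]; omega
          set t := PySem.Int.floordiv m 10 with hts
          interval_cases t <;> decide
        · rw [if_neg ho]
          exact cat_ne_empty _ _
      · rw [if_neg hm100]
        simp only
        by_cases hl : PySem.Int.mod m 100 = 0
        · rw [if_pos hl]
          have ht1 : 1 ≤ PySem.Int.floordiv m 100 := by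
            rw [PySem.Int.floordiv_eq_ediv_of_pos (by omega)]; omega
          have ht2 : PySem.Int.floordiv m 100 ≤ 9 := by
            rw [PySem.Int.floordiv_eq_ediv_of_pos (by omega)]; omega
          set t := PySem.Int.floordiv m 100 with hts
          interval_cases t <;> decide
        · rw [if_neg hl]
          exact cat_ne_empty _ _

-- B's group words agree with A's convert_less_than_thousand below 100 …
lemma groupWords_eq_small (r : Int) (h0 : 0 ≤ r) (h1 : r < 100) :
    groupWords r = convert_less_than_thousand r := by
  interval_cases r <;> (rw [convert_less_than_thousand]; decide)

-- pieces for the sub-hundred part (proof-side helper)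
def smallPieces (t o : Int) : List String :=
  if t = 1 then [PySem.List.pyGetD pvTeens o ""]
  else [PySem.List.pyGetD pvTens t "", PySem.List.pyGetD pvOnes o ""]

lemma pieces_cons (x : String) (t o : Int) :
    (if t = 1 then [x, PySem.List.pyGetD pvTeens o ""]
     else [x, PySem.List.pyGetD pvTens t "", PySem.List.pyGetD pvOnes o ""]) =
      x :: smallPieces t o := by
  rw [smallPieces]; split <;> rfl

-- … and on all of 0 ≤ g < 1000
lemma groupWords_eq (g : Int) (h0 : 0 ≤ g) (h1 : g < 1000) :
    groupWords g = convert_less_than_thousand g := by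
  by_cases hg : g < 100
  · exact groupWords_eq_small g h0 hg
  · have hd : PySem.Int.floordiv g 100 = g / 100 := PySem.Int.floordiv_eq_ediv_of_pos (by omega)
    have hm : PySem.Int.mod g 100 = g % 100 := PySem.Int.mod_eq_emod_of_pos (by omega)
    have hh1 : 1 ≤ g / 100 := by omega
    have hh2 : g / 100 ≤ 9 := by omega
    have hr0 : 0 ≤ g % 100 := by omega
    have hr1 : g % 100 < 100 := by omega
    have hd' : PySem.Int.floordiv (g % 100) 100 = 0 := by
      rw [PySem.Int.floordiv_eq_ediv_of_pos (by omega)]; omega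
    have hm' : PySem.Int.mod (g % 100) 100 = g % 100 := by
      rw [PySem.Int.mod_eq_emod_of_pos (by omega)]; omega
    -- the small part of g's words is exactly groupWords (g % 100)
    have hrecall := groupWords_eq_small (g % 100) hr0 hr1
    rw [groupWords] at hrecall
    simp only [hd', hm'] at hrecall
    rw [show PySem.List.pyGetD pvHundreds (0 : Int) "" = "" from by decide] at hrecall
    rw [pieces_cons] at hrecall
    have hskip : ("" :: smallPieces (PySem.Int.floordiv (g % 100) 10) (PySem.Int.mod (g % 100) 10)).filter
        (fun p => p ≠ "") = (smallPieces (PySem.Int.floordiv (g % 100) 10) (PySem.Int.mod (g % 100) 10)).filter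
        (fun p => p ≠ "") := by simp [List.filter]
    rw [hskip] at hrecall
    -- unfold the right side down three levels
    rw [convert_less_than_thousand,
      if_neg (show ¬ g < 10 by omega), if_neg (show ¬ g < 20 by omega),
      if_neg (show ¬ g < 100 by omega)]
    simp only [hm, hd]
    -- unfold the left side
    rw [groupWords]
    simp only [hm, hd]
    rw [pieces_cons]
    have hhne : PySem.List.pyGetD pvHundreds (g / 100) "" ≠ "" := by
      set q := g / 100 with hq
      interval_cases q <;> decide
    have hfl : (PySem.List.pyGetD pvHundreds (g / 100) "" ::
        smallPieces (PySem.Int.floordiv (g % 100) 10) (PySem.Int.mod (g % 100) 10)).filter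
          (fun p => p ≠ "") = PySem.List.pyGetD pvHundreds (g / 100) "" ::
        (smallPieces (PySem.Int.floordiv (g % 100) 10) (PySem.Int.mod (g % 100) 10)).filter
          (fun p => p ≠ "") := by
      simp [List.filter, hhne]
    rw [hfl]
    by_cases hz : g % 100 = 0
    · -- no remainder: only the hundreds word
      rw [if_pos hz]
      have ht0 : PySem.Int.floordiv (g % 100) 10 = 0 := by rw [hz]; decide
      have ho0 : PySem.Int.mod (g % 100) 10 = 0 := by rw [hz]; decide
      rw [ht0, ho0, show (smallPieces 0 0).filter (fun p => p ≠ "") = [] from by decide,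
        join_singleton]
    · -- remainder: hundreds word, a space, then the small words
      rw [if_neg hz]
      have hcne : convert_less_than_thousand (g % 100) ≠ "" := cltt_ne_empty _ (by omega) (by omega)
      have hLne : (smallPieces (PySem.Int.floordiv (g % 100) 10)
          (PySem.Int.mod (g % 100) 10)).filter (fun p => p ≠ "") ≠ [] := by
        intro he
        rw [he, join_nil] at hrecall
        exact hcne hrecall.symm
      rw [join_cons _ _ hLne, hrecall]

-- the scale word is never empty for an index in 1..11
lemma scaleWord_ne (s : Nat) (g : Int) (h1 : 1 ≤ s) (h2 : s ≤ 11) : scaleWord s g ≠ "" := by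
  rw [scaleWord]
  split <;> (interval_cases s <;> decide)

-- A's part for a group g at scale s equals B's word for it (indices within the scale table)
lemma word_eq_part (g : Int) (s : Nat) (hg0 : 0 ≤ g) (hg1 : g < 1000) (hs : s ≤ 11) :
    (if g ≠ 0 then
       [if 0 < s then groupWords g ++ " " ++ scaleWord s g else groupWords g]
     else []) =
    (if PySem.Int.mod g 1000 ≠ 0 then
       [if get_scale (PySem.Int.mod g 1000) (s : Int) ≠ "" then
          convert_less_than_thousand (PySem.Int.mod g 1000) ++ " " ++
            get_scale (PySem.Int.mod g 1000) (s : Int)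
        else convert_less_than_thousand (PySem.Int.mod g 1000)]
     else []) := by
  have hmod : PySem.Int.mod g 1000 = g := by
    rw [PySem.Int.mod_eq_emod_of_pos (by omega)]; omega
  rw [hmod]
  by_cases hz : g = 0
  · simp [hz]
  · rw [if_pos hz, if_pos hz, groupWords_eq g hg0 hg1]
    rcases Nat.eq_zero_or_pos s with hs0 | hsp
    · subst hs0
      have : get_scale g ((0:Nat) : Int) = "" := by rw [get_scale]; simp
      rw [this]
      simp
    · have hsc : get_scale g (s : Int) = scaleWord s g := by
        rw [get_scale, scaleWord]
        rw [if_neg (by exact_mod_cast Nat.pos_iff_ne_zero.mp hsp)]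
      rw [hsc, if_pos hsp, if_pos (scaleWord_ne s g hsp hs)]

-- proof-side generalization of B's descending loop with a scale offset
def WW (gs : List Int) : Nat → Nat → List String
  | 0, _ => []
  | k + 1, s =>
      (if gs.getD k 0 ≠ 0 then
         [if 0 < s + k then groupWords (gs.getD k 0) ++ " " ++ scaleWord (s + k) (gs.getD k 0)
          else groupWords (gs.getD k 0)]
       else []) ++ WW gs k s

lemma wordsDesc_eq_WW (gs : List Int) (k : Nat) : wordsDesc gs k = WW gs k 0 := by
  induction k with
  | zero => rfl
  | succ k ih => simp only [wordsDesc, WW, Nat.zero_add, ih]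

lemma WW_cons (g : Int) (gs : List Int) (k s : Nat) :
    WW (g :: gs) (k + 1) s =
      WW gs k (s + 1) ++
        (if g ≠ 0 then
           [if 0 < s then groupWords g ++ " " ++ scaleWord s g else groupWords g]
         else []) := by
  induction k with
  | zero =>
    simp only [WW, List.getD_cons_zero, Nat.add_zero, List.append_nil, List.nil_append]
  | succ k ih =>
    have h1 : WW (g :: gs) (k + 1 + 1) s =
        (if gs.getD k 0 ≠ 0 then
           [if 0 < s + (k + 1) then groupWords (gs.getD k 0) ++ " " ++ scaleWord (s + (k + 1)) (gs.getD k 0)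
            else groupWords (gs.getD k 0)]
         else []) ++ WW (g :: gs) (k + 1) s := by
      simp only [WW, List.getD_cons_succ]
    have h2 : s + (k + 1) = (s + 1) + k := by omega
    rw [h1, ih, h2, ← List.append_assoc]
    simp only [WW]

lemma groupsOf_pos (n : Int) (h : 0 < n) :
    groupsOf n = PySem.Int.mod n 1000 :: groupsOf (PySem.Int.floordiv n 1000) := by
  rw [groupsOf, dif_pos h]

lemma groupsOf_nonpos (n : Int) (h : ¬ 0 < n) : groupsOf n = [] := by
  rw [groupsOf, dif_neg h]

lemma convertParts_nonpos (n s : Int) (h : ¬ 0 < n) : convertParts n s = [] := by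
  rw [convertParts, dif_neg h]

lemma groupsOf_len_le (k : Nat) : ∀ n : Int, n < 1000 ^ k → (groupsOf n).length ≤ k := by
  induction k with
  | zero =>
    intro n hn
    have h1 : n < 1 := by simpa using hn
    rw [groupsOf_nonpos n (by omega)]
    simp
  | succ k ih =>
    intro n hn
    by_cases h : 0 < n
    · rw [groupsOf_pos n h]
      have hq : PySem.Int.floordiv n 1000 < 1000 ^ k := by
        have hlt : n < 1000 ^ k * 1000 := by
          calc n < 1000 ^ (k + 1) := hn
            _ = 1000 ^ k * 1000 := by ring
        exact (PySem.Int.floordiv_lt_iff_lt_mul (by omega)).mpr hlt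
      simpa using ih _ hq
    · rw [groupsOf_nonpos n h]; simp

lemma convertParts_pos (n s : Int) (h : 0 < n) :
    convertParts n s =
      (if PySem.Int.mod n 1000 ≠ 0 then
         [if get_scale (PySem.Int.mod n 1000) s ≠ "" then
            convert_less_than_thousand (PySem.Int.mod n 1000) ++ " " ++
              get_scale (PySem.Int.mod n 1000) s
          else convert_less_than_thousand (PySem.Int.mod n 1000)]
       else []) ++ convertParts (PySem.Int.floordiv n 1000) (s + 1) := by
  rw [convertParts, dif_pos h]

-- core: B's words list is A's parts list reversed (scale indices stay within the table)
lemma words_eq_rev_parts (k : Nat) :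
    ∀ (n : Int) (s : Nat), n.toNat = k → 0 ≤ n → s + (groupsOf n).length ≤ 12 →
      WW (groupsOf n) (groupsOf n).length s = (convertParts n (s : Int)).reverse := by
  induction k using Nat.strong_induction_on with
  | _ k IH =>
    intro n s hk hn hrange
    by_cases h : 0 < n
    · have hq0 : 0 ≤ PySem.Int.floordiv n 1000 := by
        rw [PySem.Int.floordiv_eq_ediv_of_pos (by omega)]
        exact Int.ediv_nonneg (by omega) (by omega)
      have hqlt := pvDivLt n h
      have hg0 : 0 ≤ PySem.Int.mod n 1000 := PySem.Int.mod_nonneg n (by omega)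
      have hglt : PySem.Int.mod n 1000 < 1000 := PySem.Int.mod_lt n (by omega)
      have hlen : s + 1 + (groupsOf (PySem.Int.floordiv n 1000)).length ≤ 12 := by
        rw [groupsOf_pos n h] at hrange
        simp only [List.length_cons] at hrange
        omega
      have hs11 : s ≤ 11 := by
        rw [groupsOf_pos n h] at hrange
        simp only [List.length_cons] at hrange
        omega
      rw [groupsOf_pos n h]
      simp only [List.length_cons]
      rw [WW_cons, convertParts_pos n _ h, List.reverse_append]
      congr 1
      · rw [show ((s : Int) + 1) = (((s + 1 : Nat)) : Int) from by push_cast; ring]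
        exact IH (PySem.Int.floordiv n 1000).toNat (by omega) _ (s + 1) rfl hq0 hlen
      · have hpart := word_eq_part (PySem.Int.mod n 1000) s hg0 hglt hs11
        have hmm : PySem.Int.mod (PySem.Int.mod n 1000) 1000 = PySem.Int.mod n 1000 := by
          rw [PySem.Int.mod_eq_emod_of_pos (show (0:Int) < 1000 by omega)
                (a := PySem.Int.mod n 1000)]
          omega
        rw [hmm] at hpart
        rw [hpart]
        split <;> simp
    · rw [groupsOf_nonpos n h]
      simp only [List.length_nil, WW]
      rw [convertParts_nonpos n _ h]
      rfl

lemma pos_eq (n : Int) (h0 : 0 < n) (hdom : n ≤ 2147483648) : convert n = convert_alt n := by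
  rw [convert, convert_alt]
  rw [if_neg (by omega), if_neg (by omega), dif_neg (by omega), dif_neg (by omega)]
  simp only
  rw [wordsDesc_eq_WW]
  have hlen : (groupsOf n).length ≤ 4 :=
    groupsOf_len_le 4 n (by norm_num; omega)
  have := words_eq_rev_parts n.toNat n 0 rfl (by omega) (by omega)
  rw [this]
  norm_num

-- ===== VERDICT (by name: the statement is the Claim_ definition above) =====
theorem convert_spec : Claim_equal_convert := by
  intro number hdom
  unfold Spec_convert
  have hd : -2147483648 ≤ number ∧ number ≤ 2147483648 := by
    have := hdom
    unfold Dom_convert pvDomInt at this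
    exact of_decide_eq_true this
  by_cases h0 : number = 0
  · rw [convert, convert_alt, if_pos h0, if_pos h0]
  · by_cases hneg : number < 0
    · rw [convert, convert_alt, if_neg h0, if_neg h0, dif_pos hneg, dif_pos hneg,
        pos_eq (-number) (by omega) (by omega)]
    · exact pos_eq number (by omega) (by omega)
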